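-- pv_equiv track=rewrite | github.com/ctcutler/music-as-code | minimidi.py | expand_alternatives
-- ===== SOURCE A (Python) =====
-- def expand_alternatives(s):
--     """
--     Recursively expands out all alternative cycles by making copies of the whole string
--     starting with the most deeply nested alternative cycles.
--     """
--     start = None
--     end = None
--
--     # find the first complete angle bracket pair, a.k.a. the first one that doesn't
--     # have another nested within it
--     for (i, c) in enumerate(s):
--         if c == "<":
--             start = i
--         elif c == ">":
--             end = i+1
--             break
--
--     if start is not None and end is not None:
--         alternative_cycle = s[start:end]
--         cycle_elements = alternative_cycle.strip("<>").split(" ")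
--         copies = [
--             expand_alternatives(f"{s[:start]}{element}{s[end:]}") for element in cycle_elements
--         ]
--         return " ".join(copies)
--     else:
--         return s
-- ===== SOURCE B (Python) =====
-- def expand_alternatives(s):
--     """
--     Iterative version: an explicit DFS stack of pending strings replaces the
--     recursion; leaves are collected into one flat list and joined once.
--     """
--     out = []
--     stack = [s]
--     while stack:
--         t = stack.pop()
--         end = t.find(">")
--         start = t.rfind("<", 0, end) if end != -1 else -1
--         if start == -1:
--             out.append(t)
--         else:
--             elements = t[start:end + 1].strip("<>").split(" ")
--             for element in reversed(elements):
--                 stack.append(t[:start] + element + t[end + 1:])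
--     return " ".join(out)
-- ===== Notes on version B (the rewrite author's own statement) =====
-- stated objective: alternative
-- what changed: B replaces A's recursion entirely with an iterative worklist: an explicit DFS stack of pending strings (expansions pushed in reverse so pops keep left-to-right order), leaves collected in one flat list and joined by a single top-level space-join instead of A's per-level nested joins; the bracket pair is located with str.find/str.rfind instead of A's manual enumerate scan.
import Mathlib
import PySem

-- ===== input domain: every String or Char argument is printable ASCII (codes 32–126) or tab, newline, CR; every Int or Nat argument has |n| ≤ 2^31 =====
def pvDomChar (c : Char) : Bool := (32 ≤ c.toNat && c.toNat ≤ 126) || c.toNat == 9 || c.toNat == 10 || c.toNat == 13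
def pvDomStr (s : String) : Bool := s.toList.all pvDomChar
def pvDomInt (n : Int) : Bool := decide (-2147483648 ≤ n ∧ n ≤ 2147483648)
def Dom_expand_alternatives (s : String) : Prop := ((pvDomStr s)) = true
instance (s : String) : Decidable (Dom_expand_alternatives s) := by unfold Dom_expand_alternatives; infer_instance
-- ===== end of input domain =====

-- B replaces A's recursion with an iterative worklist: an explicit DFS stack of
-- pending strings (expansions pushed in reverse so pops keep left-to-right order),
-- leaves collected into one flat list and joined once at the top; objective: alternative.
-- Both ports carry a fuel argument purely as a totality guard (A: each recursive call is
-- on a string ≥ 2 chars shorter; B: fuel = the loop's iteration count, precomputed by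
-- nodesB); the guards are never hit.

-- ===== PORT A =====
-- A's enumerate loop: start := last '<' seen, break at the first '>' (end := i+1)
def scanA : List Char → Nat → Option Nat → Option Nat × Option Nat
  | [], _, st => (st, none)
  | c :: cs, i, st =>
    if c = '<' then scanA cs (i + 1) (some i)
    else if c = '>' then (st, some (i + 1))
    else scanA cs (i + 1) st

def expandGo : Nat → List Char → List Char
  | 0, s => s          -- fuel guard, never reached (each call shrinks s by ≥ 2)
  | n + 1, s =>
    match scanA s 0 none with
    | (some st, some en) =>
      let cyc := PySem.List.slice s (some (st : Int)) (some (en : Int))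
      let elems := PySem.Chars.splitOn (PySem.Chars.stripChars cyc ['<', '>']) [' ']
      PySem.Chars.join [' ']
        (elems.map (fun e =>
          expandGo n (PySem.List.slice s none (some (st : Int)) ++ e ++
                      PySem.List.slice s (some (en : Int)) none)))
    | _ => s

def expand_alternatives (s : String) : String :=
  String.ofList (expandGo (s.toList.length + 1) s.toList)

-- ===== PORT B =====
-- end = t.find(">")
def brkEnd (t : List Char) : Int := PySem.Chars.find t ['>']
-- start = t.rfind("<", 0, end) if end != -1 else -1
def brkStart (t : List Char) : Int :=
  if brkEnd t ≠ -1 then PySem.Chars.rfindFrom t ['<'] 0 (some (brkEnd t)) else -1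

-- the strings pushed for t, in pop order (python pushes reversed(elements), so the
-- stack's top ends up holding the first element's string)
def childrenB (t : List Char) : List (List Char) :=
  (PySem.Chars.splitOn
      (PySem.Chars.stripChars (PySem.List.slice t (some (brkStart t)) (some (brkEnd t + 1))) ['<', '>'])
      [' ']).map
    (fun el => PySem.List.slice t none (some (brkStart t)) ++ el ++
               PySem.List.slice t (some (brkEnd t + 1)) none)

-- fuel guard only: the number of iterations the while loop performs starting from t
def nodesB : Nat → List Char → Nat
  | 0, _ => 1
  | n + 1, t => if brkStart t = -1 then 1 else 1 + ((childrenB t).map (nodesB n)).sum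

-- the while loop: pop t, either append it to out or push its expansions
def loopB : Nat → List (List Char) → List (List Char) → List (List Char)
  | 0, stack, acc => acc ++ stack      -- fuel guard, never reached
  | _ + 1, [], acc => acc
  | n + 1, t :: stack, acc =>
    if brkStart t = -1 then loopB n stack (acc ++ [t])
    else loopB n (childrenB t ++ stack) acc

def expand_alternatives_alt (s : String) : String :=
  String.ofList (PySem.Chars.join [' ']
    (loopB (nodesB (s.toList.length + 1) s.toList) [s.toList] []))

-- ===== PRECONDITION & SPEC =====
def Spec_expand_alternatives (s : String) (out : String) : Prop := out = expand_alternatives_alt s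
instance (s : String) (out : String) : Decidable (Spec_expand_alternatives s out) := by unfold Spec_expand_alternatives; infer_instance

-- ===== CLAIM (what is proved, stated in full; the proofs are below) =====
def Claim_equal_expand_alternatives : Prop := ∀ (s : String), Dom_expand_alternatives s → Spec_expand_alternatives s (expand_alternatives s)

-- ===== LEMMAS AND PROOFS =====

-- index (from the front) of the last occurrence of ch; proof-side description of the scans
def lastIdx (ch : Char) : List Char → Option Nat
  | [] => none
  | c :: cs =>
    match lastIdx ch cs with
    | some j => some (j + 1)
    | none => if c = ch then some 0 else none

theorem scanA_eq (t : List Char) : ∀ (i : Nat) (st : Option Nat),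
    scanA t i st =
      match t.findIdx? (· = '>') with
      | none => (((lastIdx '<' t).map (· + i)).or st, none)
      | some j => (((lastIdx '<' (t.take j)).map (· + i)).or st, some (i + j + 1)) := by
  induction t with
  | nil => intro i st; simp [scanA, lastIdx]
  | cons c cs ih =>
    intro i st
    by_cases hlt : c = '<'
    · subst hlt
      simp only [scanA, if_pos rfl, List.findIdx?_cons, show (('<' = '>') : Bool) = false from rfl,
        Bool.false_eq_true, if_false]
      rw [ih]
      cases hf : cs.findIdx? (· = '>') with
      | none =>
        simp only [hf, Option.map_none, lastIdx]
        cases hl : lastIdx '<' cs with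
        | none => simp [Option.or, Prod.ext_iff, lastIdx]; try omega
        | some j => simp [hl, Option.or, Prod.ext_iff]; try omega
      | some j =>
        simp only [hf, Option.map_some, List.take_succ_cons, lastIdx]
        cases hl : lastIdx '<' (cs.take j) with
        | none => simp [Option.or, Prod.ext_iff, lastIdx]; try omega
        | some k => simp [hl, Option.or, Prod.ext_iff]; try omega
    · by_cases hgt : c = '>'
      · subst hgt
        simp [scanA, List.findIdx?_cons, lastIdx]
      · have hgt' : ((c = '>') : Bool) = false := by simp [hgt]
        have hlt' : ¬ (c = '<') := hlt
        simp only [scanA, if_neg hlt', if_neg hgt, List.findIdx?_cons, hgt', Bool.false_eq_true,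
          if_false]
        rw [ih]
        cases hf : cs.findIdx? (· = '>') with
        | none =>
          simp only [hf, Option.map_none, lastIdx]
          cases hl : lastIdx '<' cs with
          | none => simp [Option.or, Prod.ext_iff, lastIdx, hlt]; try omega
          | some j => simp [hl, Option.or, Prod.ext_iff]; try omega
        | some j =>
          simp only [hf, Option.map_some, List.take_succ_cons, lastIdx]
          cases hl : lastIdx '<' (cs.take j) with
          | none => simp [Option.or, Prod.ext_iff, lastIdx, hlt]; try omega
          | some k => simp [hl, Option.or, Prod.ext_iff]; try omega

theorem findgo_char (ch : Char) (t : List Char) : ∀ (k : Nat),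
    PySem.Chars.find.go [ch] t k =
      match t.findIdx? (· = ch) with
      | none => -1
      | some j => ((k + j : Nat) : Int) := by
  induction t with
  | nil => intro k; simp [PySem.Chars.find.go]
  | cons c cs ih =>
    intro k
    rw [PySem.Chars.find.go]
    by_cases h : c = ch
    · subst h; simp [List.findIdx?_cons, List.isPrefixOf]
    · have : ([ch].isPrefixOf (c :: cs)) = false := by
        simp [List.isPrefixOf, h]
        intro hh; exact absurd hh.symm h
      rw [this]
      simp only [Bool.false_eq_true, if_false, ih]
      simp only [List.findIdx?_cons]
      have hcb : ((c = ch) : Bool) = false := by simp [h]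
      rw [hcb]
      cases hf : cs.findIdx? (· = ch) with
      | none => simp
      | some j => simp; push_cast; ring

theorem findChar_eq (t : List Char) (ch : Char) :
    PySem.Chars.find t [ch] =
      match t.findIdx? (· = ch) with
      | none => -1
      | some j => (j : Int) := by
  rw [PySem.Chars.find, findgo_char]
  cases hf : t.findIdx? (· = ch) <;> simp

theorem lastIdx_append_single (ch c : Char) (xs : List Char) :
    lastIdx ch (xs ++ [c]) = if c = ch then some xs.length else lastIdx ch xs := by
  induction xs with
  | nil => by_cases h : c = ch <;> simp [lastIdx, h]
  | cons x xs ih =>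
    show lastIdx ch (x :: (xs ++ [c])) = _
    by_cases h : c = ch
    · simp only [lastIdx, ih, if_pos h]
      cases lastIdx ch xs <;> simp [lastIdx]
    · simp only [lastIdx, ih, if_neg h]

theorem rfindgo_char (ch : Char) (u : List Char) : ∀ (k : Nat),
    PySem.Chars.rfind.go u [ch] k =
      match lastIdx ch (u.take (k + 1)) with
      | none => -1
      | some j => (j : Int) := by
  intro k
  induction k with
  | zero =>
    rw [PySem.Chars.rfind.go]
    cases u with
    | nil => simp [lastIdx]
    | cons c cs =>
      by_cases h : c = ch
      · subst h; simp [List.isPrefixOf, lastIdx]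
      · have : ([ch].isPrefixOf (c :: cs)) = false := by
          simp [List.isPrefixOf]; intro hh; exact absurd hh.symm h
        simp [this, lastIdx, h]
  | succ k ih =>
    rw [PySem.Chars.rfind.go]
    by_cases hk : k + 1 < u.length
    · have hget : u.drop (k+1) = u[k+1] :: u.drop (k+2) := by
        rw [List.drop_eq_getElem_cons hk]
      by_cases h : u[k+1] = ch
      · have : ([ch].isPrefixOf (u.drop (k+1))) = true := by
          rw [hget]; simp [List.isPrefixOf, h]
        rw [this]
        have htake : u.take (k + 2) = u.take (k+1) ++ [u[k+1]] := by
          rw [List.take_succ, List.getElem?_eq_getElem hk]; rfl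
        simp [htake, lastIdx_append_single, h, List.length_take, Nat.min_eq_left (Nat.le_of_lt hk)]
      · have : ([ch].isPrefixOf (u.drop (k+1))) = false := by
          rw [hget]; simp [List.isPrefixOf]; intro hh; exact absurd hh.symm h
        rw [this]
        simp only [Bool.false_eq_true, if_false, ih]
        have htake : u.take (k + 2) = u.take (k+1) ++ [u[k+1]] := by
          rw [List.take_succ, List.getElem?_eq_getElem hk]; rfl
        rw [htake, lastIdx_append_single, if_neg h]
    · have hd : u.drop (k+1) = [] := List.drop_eq_nil_of_le (by omega)
      have : ([ch].isPrefixOf (u.drop (k+1))) = false := by simp [hd, List.isPrefixOf]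
      rw [this]
      simp only [Bool.false_eq_true, if_false, ih]
      rw [List.take_of_length_le (by omega), List.take_of_length_le (by omega)]

theorem rfindChar_eq (u : List Char) (ch : Char) :
    PySem.Chars.rfind u [ch] =
      match lastIdx ch u with
      | none => -1
      | some k => (k : Int) := by
  rw [PySem.Chars.rfind, rfindgo_char, List.take_of_length_le (by omega)]

theorem rfindFrom_char_take (t : List Char) (ch : Char) (j : Nat) (hj : j ≤ t.length) :
    PySem.Chars.rfindFrom t [ch] 0 (some (j : Int)) =
      match lastIdx ch (t.take j) with
      | none => -1
      | some k => (k : Int) := by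
  rw [PySem.Chars.rfindFrom]
  have hS : (if (0:Int) < 0 then if 0 + (t.length:Int) < 0 then 0 else 0 + (t.length:Int) else 0) = (0:Int) := by
    norm_num
  have hE : (if (t.length:Int) < (j:Int) then ((t.length:Int)) else if (j:Int) < 0 then (if (j:Int) + (t.length:Int) < 0 then 0 else (j:Int) + (t.length:Int)) else (j:Int)) = (j:Int) := by
    split_ifs <;> omega
  rw [hS, hE, if_neg (by omega), Int.toNat_natCast, Int.toNat_zero, List.drop_zero,
    rfindChar_eq]
  cases hl : lastIdx ch (t.take j) with
  | none => simp [hl]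
  | some k => simp [hl]

-- lastIdx really points at an occurrence
theorem lastIdx_spec (ch : Char) : ∀ (u : List Char) (k : Nat), lastIdx ch u = some k →
    k < u.length ∧ u[k]? = some ch := by
  intro u
  induction u with
  | nil => intro k h; simp [lastIdx] at h
  | cons c cs ih =>
    intro k h
    rw [lastIdx] at h
    cases hl : lastIdx ch cs with
    | some j =>
      rw [hl] at h
      simp only [Option.some.injEq] at h
      obtain ⟨hj1, hj2⟩ := ih j hl
      subst h
      refine ⟨by simpa using Nat.succ_lt_succ hj1, by simpa using hj2⟩
    | none =>
      rw [hl] at h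
      by_cases hc : c = ch
      · rw [if_pos hc] at h
        simp only [Option.some.injEq] at h
        subst h
        exact ⟨by simp, by simp [hc]⟩
      · rw [if_neg hc] at h; cases h

-- characterization of B's bracket search
theorem brkEnd_eq (t : List Char) :
    brkEnd t = match t.findIdx? (· = '>') with | none => -1 | some j => (j : Int) := by
  rw [brkEnd, findChar_eq]

theorem brkStart_eq (t : List Char) :
    brkStart t =
      match t.findIdx? (· = '>') with
      | none => -1
      | some j => (match lastIdx '<' (t.take j) with | none => -1 | some k => (k : Int)) := by
  cases hf : t.findIdx? (· = '>') with
  | none => simp [brkStart, brkEnd_eq, hf]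
  | some j =>
    have hj : j < t.length := (List.findIdx?_eq_some_iff_findIdx_eq.mp hf).1
    simp only [brkStart, brkEnd_eq, hf]
    rw [if_pos (show ((j : Int)) ≠ -1 by omega), rfindFrom_char_take t '<' j hj.le]

-- everything the positive case of B's search gives us
theorem brk_pos (t : List Char) (h : brkStart t ≠ -1) :
    ∃ j k, t.findIdx? (· = '>') = some j ∧ lastIdx '<' (t.take j) = some k ∧
      brkStart t = (k : Int) ∧ brkEnd t = (j : Int) ∧ k < j ∧ j < t.length ∧
      t[k]? = some '<' ∧ t[j]? = some '>' := by
  have hb := brkStart_eq t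
  cases hf : t.findIdx? (· = '>') with
  | none => rw [hf] at hb; exact absurd hb h
  | some j =>
    rw [hf] at hb
    have hb' : brkStart t = (match lastIdx '<' (t.take j) with | none => -1 | some k => ((k : Nat) : Int)) := hb
    have hj : j < t.length := (List.findIdx?_eq_some_iff_findIdx_eq.mp hf).1
    cases hl : lastIdx '<' (t.take j) with
    | none => rw [hl] at hb'; exact absurd hb' h
    | some k =>
      rw [hl] at hb'
      obtain ⟨hk1, hk2⟩ := lastIdx_spec '<' (t.take j) k hl
      have hkj : k < j := by
        have : (t.take j).length = j := by simp [List.length_take, Nat.min_eq_left hj.le]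
        omega
      have hgj : t[j]? = some '>' := by
        obtain ⟨h2, h1⟩ := List.findIdx?_eq_some_iff_findIdx_eq.mp hf
        subst h1
        have h3 := List.findIdx_getElem (p := (· = '>')) (xs := t) (w := h2)
        simp only [decide_eq_true_eq] at h3
        rw [List.getElem?_eq_getElem h2, h3]
      have hgk : t[k]? = some '<' := by
        rw [← List.getElem?_take_of_lt hkj]; exact hk2
      have hend : brkEnd t = (j : Int) := by rw [brkEnd_eq, hf]
      exact ⟨j, k, rfl, hl, hb', hend, hkj, hj, hgk, hgj⟩

-- each piece of a split is no longer than the input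
theorem splitOn_go_len (sep : List Char) : ∀ (fuel : Nat) (l cur : List Char) (acc : List (List Char)),
    ∀ e ∈ PySem.Chars.splitOn.go sep fuel l cur acc, e ∈ acc ∨ e.length ≤ cur.length + l.length := by
  intro fuel
  induction fuel with
  | zero =>
    intro l cur acc e he
    rw [PySem.Chars.splitOn.go] at he
    rw [List.mem_reverse, List.mem_cons] at he
    rcases he with he | he
    · right; subst he; simp
    · left; exact he
  | succ n ih =>
    intro l cur acc e he
    cases l with
    | nil =>
      rw [PySem.Chars.splitOn.go] at he
      · rw [List.mem_reverse, List.mem_cons] at he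
        rcases he with he | he
        · right; subst he; simp
        · left; exact he
      · omega
    | cons c rest =>
      rw [PySem.Chars.splitOn.go] at he
      by_cases h : sep.isPrefixOf (c :: rest)
      · rw [if_pos h] at he
        rcases ih _ _ _ e he with he' | he'
        · rcases List.mem_cons.mp he' with he'' | he''
          · right; subst he''; simp
          · left; exact he''
        · right
          have := List.length_drop (l := (c :: rest)) (i := sep.length)
          simp only [List.length_nil, Nat.zero_add] at he'
          omega
      · rw [if_neg (by simpa using h)] at he
        rcases ih _ _ _ e he with he' | he'
        · left; exact he'
        · right; simp at he' ⊢; omega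

theorem splitOn_len (s sep : List Char) : ∀ e ∈ PySem.Chars.splitOn s sep, e.length ≤ s.length := by
  intro e he
  rw [PySem.Chars.splitOn] at he
  rcases splitOn_go_len sep _ s [] [] e he with h | h
  · cases h
  · simpa using h

-- stripping a bracketed chunk removes at least its two bracket characters
theorem stripChars_len (x chars : List Char) (a b : Char)
    (hh : x.head? = some a) (ha : chars.contains a = true)
    (hl : x.getLast? = some b) (hb : chars.contains b = true) (h2 : 2 ≤ x.length) :
    (PySem.Chars.stripChars x chars).length + 2 ≤ x.length := by
  rw [PySem.Chars.stripChars]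
  have h1 : (List.dropWhile (fun c => chars.contains c) x).length + 1 ≤ x.length := by
    cases x with
    | nil => cases hh
    | cons a' xs =>
      have ha' : a' = a := by simpa using hh
      subst ha'
      rw [List.dropWhile_cons_of_pos (by simpa using ha)]
      have := List.length_dropWhile_le (fun c => chars.contains c) xs
      simp only [List.length_cons]; omega
  cases hy : List.dropWhile (fun c => chars.contains c) x with
  | nil =>
    simp only [List.reverse_nil, List.dropWhile_nil, List.length_nil]
    omega
  | cons y0 ys =>
    have hyne : List.dropWhile (fun c => chars.contains c) x ≠ [] := by rw [hy]; simp
    have hsuf := List.dropWhile_suffix (l := x) (fun c => chars.contains c)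
    obtain ⟨u, hu⟩ := hsuf
    have hlast : (List.dropWhile (fun c => chars.contains c) x).getLast? = some b := by
      rw [← hu] at hl
      rw [List.getLast?_append_of_ne_nil u hyne] at hl
      exact hl
    have hhead : (List.dropWhile (fun c => chars.contains c) x).reverse.head? = some b := by
      rw [List.head?_reverse]; exact hlast
    cases hr : (List.dropWhile (fun c => chars.contains c) x).reverse with
    | nil => rw [hr] at hhead; cases hhead
    | cons r0 rs =>
      have hr0 : r0 = b := by rw [hr] at hhead; simpa using hhead
      subst hr0
      rw [← hy, hr, List.dropWhile_cons_of_pos (by simpa using hb)]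
      have h3 := List.length_dropWhile_le (fun c => chars.contains c) rs
      have h4 : rs.length + 1 = (List.dropWhile (fun c => chars.contains c) x).length := by
        have := congrArg List.length hr
        simp only [List.length_reverse, List.length_cons] at this
        omega
      simp only [List.length_reverse]; omega

-- every string pushed by B's loop is at least two characters shorter
theorem brkStart_ne (t : List Char) (j k : Nat) (hf : t.findIdx? (· = '>') = some j)
    (hl : lastIdx '<' (t.take j) = some k) : brkStart t = (k : Int) := by
  rw [brkStart_eq, hf]
  show (match lastIdx '<' (t.take j) with | none => (-1 : Int) | some k => ((k : Nat) : Int)) = (k : Int)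
  rw [hl]

theorem childrenB_len (t : List Char) (h : brkStart t ≠ -1) :
    ∀ c ∈ childrenB t, c.length + 2 ≤ t.length := by
  obtain ⟨j, k, hf, hl, hst, hend, hkj, hj, hgk, hgj⟩ := brk_pos t h
  intro c hc
  rw [childrenB, hst, hend] at hc
  have hc1 : ((j : Int) + 1) = ((j + 1 : Nat) : Int) := by push_cast; ring
  rw [hc1, PySem.List.slice_natCast, PySem.List.slice_to_natCast,
    PySem.List.slice_from_natCast] at hc
  obtain ⟨el, hel, hcel⟩ := List.mem_map.mp hc
  have hxlen : ((t.drop k).take (j + 1 - k)).length = j + 1 - k := by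
    simp [List.length_take, List.length_drop]; omega
  have hxhead : ((t.drop k).take (j + 1 - k)).head? = some '<' := by
    rw [List.head?_eq_getElem?, List.getElem?_take_of_lt (by omega), List.getElem?_drop,
      Nat.add_zero]
    exact hgk
  have hxlast : ((t.drop k).take (j + 1 - k)).getLast? = some '>' := by
    rw [List.getLast?_eq_getElem?, hxlen]
    have : j + 1 - k - 1 = j - k := by omega
    rw [this, List.getElem?_take_of_lt (by omega), List.getElem?_drop]
    have : k + (j - k) = j := by omega
    rw [this]; exact hgj
  have hstrip := stripChars_len _ ['<', '>'] '<' '>' hxhead (by decide) hxlast (by decide)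
    (by omega)
  have hellen := splitOn_len _ [' '] el hel
  rw [← hcel]
  simp only [List.length_append, List.length_take, List.length_drop]
  omega

-- non-emptiness of splits (for the join algebra)
theorem splitOn_go_ne_nil (sep : List Char) : ∀ (fuel : Nat) (l cur : List Char) (acc : List (List Char)),
    PySem.Chars.splitOn.go sep fuel l cur acc ≠ [] := by
  intro fuel
  induction fuel with
  | zero => intro l cur acc; rw [PySem.Chars.splitOn.go]; simp
  | succ n ih =>
    intro l cur acc
    cases l with
    | nil => rw [PySem.Chars.splitOn.go]; simp; omega
    | cons c rest =>
      rw [PySem.Chars.splitOn.go]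
      by_cases h : sep.isPrefixOf (c :: rest)
      · simp only [h, if_pos]; exact ih _ _ _
      · simp only [h, Bool.false_eq_true, if_false]; exact ih _ _ _

theorem splitOn_ne_nil (s sep : List Char) : PySem.Chars.splitOn s sep ≠ [] := by
  rw [PySem.Chars.splitOn]; exact splitOn_go_ne_nil _ _ _ _ _

theorem join_append_sep (sep : List Char) (l m : List (List Char)) (hl : l ≠ []) (hm : m ≠ []) :
    PySem.Chars.join sep (l ++ m) = PySem.Chars.join sep l ++ sep ++ PySem.Chars.join sep m := by
  induction l with
  | nil => exact absurd rfl hl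
  | cons p l ih =>
    cases l with
    | nil =>
      cases m with
      | nil => exact absurd rfl hm
      | cons q rest => simp [PySem.Chars.join_cons_cons, PySem.Chars.join_singleton]
    | cons q rest =>
      have h1 : PySem.Chars.join sep ((p :: q :: rest) ++ m) = p ++ sep ++ PySem.Chars.join sep ((q :: rest) ++ m) :=
        PySem.Chars.join_cons_cons ..
      rw [h1, ih (by simp), PySem.Chars.join_cons_cons]
      simp [List.append_assoc]

theorem join_map_join (sep : List Char) (ls : List (List (List Char))) (h : ∀ l ∈ ls, l ≠ []) :
    PySem.Chars.join sep (ls.map (PySem.Chars.join sep)) = PySem.Chars.join sep ls.flatten := by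
  induction ls with
  | nil => simp
  | cons l ls ih =>
    have hl : l ≠ [] := h l (by simp)
    cases ls with
    | nil => simp [PySem.Chars.join_singleton]
    | cons l' rest =>
      have hm : (l' :: rest).flatten ≠ [] := by
        have : l' ≠ [] := h l' (by simp)
        cases l' with
        | nil => exact absurd rfl this
        | cons a b => simp
      rw [List.map_cons, show PySem.Chars.join sep (l :: l' :: rest).flatten = PySem.Chars.join sep (l ++ (l' :: rest).flatten) from by simp [List.flatten_cons]]
      rw [join_append_sep sep l _ hl hm]
      rw [show (PySem.Chars.join sep l) :: (l' :: rest).map (PySem.Chars.join sep) = [PySem.Chars.join sep l] ++ (l' :: rest).map (PySem.Chars.join sep) from rfl]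
      rw [join_append_sep sep _ _ (by simp) (by simp), PySem.Chars.join_singleton]
      rw [ih (fun x hx => h x (by simp [hx]))]

-- proof-side tree of leaves (the recursion A performs, phrased with B's search)
def leavesB : Nat → List Char → List (List Char)
  | 0, t => [t]
  | n + 1, t => if brkStart t = -1 then [t] else ((childrenB t).map (leavesB n)).flatten

theorem childrenB_ne_nil (t : List Char) : childrenB t ≠ [] := by
  rw [childrenB]
  simp only [ne_eq, List.map_eq_nil_iff]
  exact splitOn_ne_nil _ _

theorem leavesB_fuel : ∀ (n m : Nat) (t : List Char), t.length < n → t.length < m →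
    leavesB n t = leavesB m t := by
  intro n
  induction n with
  | zero => intro m t h; omega
  | succ n ih =>
    intro m t hn hm
    cases m with
    | zero => omega
    | succ m =>
      by_cases hb : brkStart t = -1
      · simp [leavesB, hb]
      · show (if brkStart t = -1 then [t] else ((childrenB t).map (leavesB n)).flatten) =
          (if brkStart t = -1 then [t] else ((childrenB t).map (leavesB m)).flatten)
        rw [if_neg hb, if_neg hb]
        congr 1
        apply List.map_congr_left
        intro c hc
        have h2 := childrenB_len t hb c hc
        exact ih m c (by omega) (by omega)

theorem nodesB_fuel : ∀ (n m : Nat) (t : List Char), t.length < n → t.length < m →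
    nodesB n t = nodesB m t := by
  intro n
  induction n with
  | zero => intro m t h; omega
  | succ n ih =>
    intro m t hn hm
    cases m with
    | zero => omega
    | succ m =>
      by_cases hb : brkStart t = -1
      · simp [nodesB, hb]
      · show (if brkStart t = -1 then 1 else 1 + ((childrenB t).map (nodesB n)).sum) =
          (if brkStart t = -1 then 1 else 1 + ((childrenB t).map (nodesB m)).sum)
        rw [if_neg hb, if_neg hb]
        congr 2
        apply List.map_congr_left
        intro c hc
        have h2 := childrenB_len t hb c hc
        exact ih m c (by omega) (by omega)

theorem nodesB_pos (n : Nat) (t : List Char) : 1 ≤ nodesB n t := by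
  cases n with
  | zero => simp [nodesB]
  | succ n =>
    show 1 ≤ if brkStart t = -1 then 1 else 1 + ((childrenB t).map (nodesB n)).sum
    by_cases hb : brkStart t = -1 <;> simp [hb]

theorem leavesB_ne_nil : ∀ (n : Nat) (t : List Char), leavesB n t ≠ [] := by
  intro n
  induction n with
  | zero => intro t; simp [leavesB]
  | succ n ih =>
    intro t
    by_cases hb : brkStart t = -1
    · simp [leavesB, hb]
    · show (if brkStart t = -1 then [t] else ((childrenB t).map (leavesB n)).flatten) ≠ []
      rw [if_neg hb]
      cases hch : childrenB t with
      | nil => exact absurd hch (childrenB_ne_nil t)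
      | cons c0 cs =>
        simp only [List.map_cons, List.flatten_cons, ne_eq, List.append_eq_nil_iff, not_and]
        intro hcon
        exact absurd hcon (ih c0)

-- the worklist loop computes the concatenation of the leaves of its stack
theorem loopB_spec : ∀ (fuel : Nat) (stack acc : List (List Char)),
    (stack.map (fun t => nodesB (t.length + 1) t)).sum ≤ fuel →
    loopB fuel stack acc = acc ++ (stack.map (fun t => leavesB (t.length + 1) t)).flatten := by
  intro fuel
  induction fuel with
  | zero =>
    intro stack acc hsum
    cases stack with
    | nil => simp [loopB]
    | cons t rest =>
      exfalso
      have h1 := nodesB_pos (t.length + 1) t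
      simp only [List.map_cons, List.sum_cons] at hsum
      omega
  | succ n ih =>
    intro stack acc hsum
    cases stack with
    | nil => simp [loopB]
    | cons t rest =>
      simp only [List.map_cons, List.sum_cons] at hsum
      by_cases hb : brkStart t = -1
      · have hnt : nodesB (t.length + 1) t = 1 := by
          show (if brkStart t = -1 then 1 else 1 + ((childrenB t).map (nodesB t.length)).sum) = 1
          rw [if_pos hb]
        have hlt : leavesB (t.length + 1) t = [t] := by
          show (if brkStart t = -1 then [t] else ((childrenB t).map (leavesB t.length)).flatten) = [t]
          rw [if_pos hb]
        show (if brkStart t = -1 then loopB n rest (acc ++ [t])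
              else loopB n (childrenB t ++ rest) acc) = _
        rw [if_pos hb, ih rest (acc ++ [t]) (by omega)]
        simp [hlt, List.append_assoc]
      · have hchn : ((childrenB t).map (fun c => nodesB (c.length + 1) c)).sum =
            ((childrenB t).map (nodesB t.length)).sum := by
          congr 1
          apply List.map_congr_left
          intro c hc
          have h2 := childrenB_len t hb c hc
          exact nodesB_fuel (c.length + 1) t.length c (by omega) (by omega)
        have hnt : nodesB (t.length + 1) t = 1 + ((childrenB t).map (nodesB t.length)).sum := by
          show (if brkStart t = -1 then 1 else 1 + ((childrenB t).map (nodesB t.length)).sum) = _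
          rw [if_neg hb]
        have hlt : leavesB (t.length + 1) t =
            ((childrenB t).map (fun c => leavesB (c.length + 1) c)).flatten := by
          show (if brkStart t = -1 then [t] else ((childrenB t).map (leavesB t.length)).flatten) = _
          rw [if_neg hb]
          congr 1
          apply List.map_congr_left
          intro c hc
          have h2 := childrenB_len t hb c hc
          exact leavesB_fuel t.length (c.length + 1) c (by omega) (by omega)
        show (if brkStart t = -1 then loopB n rest (acc ++ [t])
              else loopB n (childrenB t ++ rest) acc) = _
        rw [if_neg hb, ih (childrenB t ++ rest) acc (by
          simp only [List.map_append, List.sum_append]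
          omega)]
        simp only [List.map_cons, List.flatten_cons, List.map_append, List.flatten_append, hlt,
          List.append_assoc]

theorem expandGo_succ_leaf (n : Nat) (t : List Char)
    (h : (scanA t 0 none).1 = none ∨ (scanA t 0 none).2 = none) :
    expandGo (n + 1) t = t := by
  rw [expandGo]
  rcases hs : scanA t 0 none with ⟨a, b⟩
  rw [hs] at h
  rcases h with h | h <;> simp only at h <;> subst h
  · rfl
  · cases a <;> rfl

theorem leavesB_succ_leaf (n : Nat) (t : List Char) (h : brkStart t = -1) :
    leavesB (n + 1) t = [t] := by
  show (if brkStart t = -1 then [t] else ((childrenB t).map (leavesB n)).flatten) = [t]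
  rw [if_pos h]

theorem brkStart_of_none (t : List Char) (hf : t.findIdx? (· = '>') = none) :
    brkStart t = -1 := by
  rw [brkStart_eq, hf]

theorem brkStart_of_no_lt (t : List Char) (j : Nat) (hf : t.findIdx? (· = '>') = some j)
    (hl : lastIdx '<' (t.take j) = none) : brkStart t = -1 := by
  rw [brkStart_eq, hf]
  show (match lastIdx '<' (t.take j) with | none => (-1 : Int) | some k => ((k : Nat) : Int)) = -1
  rw [hl]

-- A's recursion computes the join of the same leaves
theorem expandGo_eq_join_leavesB (n : Nat) : ∀ (t : List Char),
    expandGo n t = PySem.Chars.join [' '] (leavesB n t) := by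
  induction n with
  | zero => intro t; simp [expandGo, leavesB, PySem.Chars.join_singleton]
  | succ n ih =>
    intro t
    cases hf : t.findIdx? (· = '>') with
    | none =>
      rw [expandGo_succ_leaf n t (by rw [scanA_eq, hf]; simp),
          leavesB_succ_leaf n t (brkStart_of_none t hf), PySem.Chars.join_singleton]
    | some j =>
      have hj : j < t.length := (List.findIdx?_eq_some_iff_findIdx_eq.mp hf).1
      cases hl : lastIdx '<' (t.take j) with
      | none =>
        rw [expandGo_succ_leaf n t (by rw [scanA_eq, hf]; simp [hl]),
            leavesB_succ_leaf n t (brkStart_of_no_lt t j hf hl), PySem.Chars.join_singleton]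
      | some k =>
        have hb : brkStart t = (k : Int) := brkStart_ne t j k hf hl
        have hbne : brkStart t ≠ -1 := by rw [hb]; omega
        have hend : brkEnd t = (j : Int) := by rw [brkEnd_eq, hf]
        -- A's step
        rw [expandGo, scanA_eq, hf]
        simp only [hl, Option.map_some, Nat.add_zero, Nat.zero_add,
          show (some k).or (none : Option Nat) = some k from rfl]
        -- B's step
        rw [show leavesB (n + 1) t =
            (if brkStart t = -1 then [t] else ((childrenB t).map (leavesB n)).flatten) from rfl,
          if_neg hbne, childrenB, hb, hend, List.map_map]
        have hc : ((j + 1 : Nat) : Int) = (j : Int) + 1 := by push_cast; ring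
        rw [hc]
        rw [show (fun e => expandGo n (PySem.List.slice t none (some (k : Int)) ++ e ++
              PySem.List.slice t (some ((j : Int) + 1)) none)) =
            (fun e => PySem.Chars.join [' '] (leavesB n (PySem.List.slice t none (some (k : Int)) ++ e ++
              PySem.List.slice t (some ((j : Int) + 1)) none))) from funext fun e => ih _]
        have hnn : ∀ l ∈ List.map (fun el => leavesB n (PySem.List.slice t none (some (k : Int)) ++ el ++
              PySem.List.slice t (some ((j : Int) + 1)) none))
            (PySem.Chars.splitOn (PySem.Chars.stripChars
              (PySem.List.slice t (some (k : Int)) (some ((j : Int) + 1))) ['<', '>']) [' ']), l ≠ [] := by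
          intro l hl'
          rw [List.mem_map] at hl'
          obtain ⟨x, _, hx⟩ := hl'
          rw [← hx]
          exact leavesB_ne_nil n _
        have hjm := join_map_join [' '] _ hnn
        rw [List.map_map] at hjm
        exact hjm

-- ===== VERDICT (by name: the statement is the Claim_ definition above) =====
theorem expand_alternatives_spec : Claim_equal_expand_alternatives := by
  intro s _
  unfold Spec_expand_alternatives expand_alternatives expand_alternatives_alt
  rw [expandGo_eq_join_leavesB]
  rw [loopB_spec _ _ _ (by simp)]
  simp
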